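-- pv_equiv track=rewrite | github.com/Bradyphrenia/prothesen | prothesen.py | format_winkel
-- ===== SOURCE A (Python) =====
-- def format_winkel(text: str) -> 'format_winkel':
--     """
--     Formatieren der Winkelangaben
--     :param text: Text unformatierter Winkel
--     :return: Text formatierter Winkel
--     """
--     text = text.strip()
--     if text == 'Null' or text == '.' or text == '':  # leer?
--         return ''
--     if text[0:1] == '.':  # . an erster Position
--         text = '0' + text
--         return format_winkel(text)  # Rekursion
--     if '.' not in text and text[0:1] not in ('+', '-'):  # nur 3 Ziffern
--         text = '+' + text[0:2] + '.' + text[2:3]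
--         return format_winkel(text)  # Rekursion
--     if text[0:1] not in ('+', '-'):  # kein Vorzeichen
--         text = '+' + text
--         return format_winkel(text)  # Rekursion
--     if text[0:1] in ('+', '-') and '.' not in text:  # Vorzeichen, kein Punkt
--         text = text[0:3] + '.' + text[3:4]
--         return format_winkel(text)  # Rekursion
--     if text[2:3] == '.':  # einstellig vor Punkt, Punkt nach hinten
--         text = text[0:1] + ' ' + text[1:]
--         return format_winkel(text)  # Rekursion
--     if len(text) < 5 and '.' in text:  # leer nach Punkt, .0
--         text += '0'
--         return format_winkel(text)  # Rekursion
--     if text[1:2] == '0':  # zwei führende Nullen vor Punkt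
--         text = text[0:1] + ' ' + text[2:]
--         return format_winkel(text)  # Rekursion
--     if text[1:2] == ' ' and text[2:3] == ' ':  # 2 Leerstellen vor Punkt
--         text = text[0:1] + '0' + text[3:]
--         return format_winkel(text)  # Rekursion
--     if text[2:3] == ' ':  # Leerstelle vor Punkt
--         text = text[0:2] + text[3:]
--         return format_winkel(text)  # Rekursion
--     return text
-- ===== SOURCE B (Python) =====
-- def format_winkel(text: str) -> 'format_winkel':
--     """Iterative re-implementation: one while-loop normalizing a single
--     string variable instead of tail recursion; redundant guard conjuncts
--     already implied by earlier elif branches are dropped."""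
--     t = text.strip()
--     while True:
--         if t in ('Null', '.', ''):
--             return ''
--         if t[0] == '.':
--             t = '0' + t
--         elif '.' not in t and t[0] not in ('+', '-'):
--             t = '+' + t[0:2] + '.' + t[2:3]
--         elif t[0] not in ('+', '-'):
--             t = '+' + t
--         elif '.' not in t:
--             t = t[0:3] + '.' + t[3:4]
--         elif t[2:3] == '.':
--             t = t[0] + ' ' + t[1:]
--         elif len(t) < 5:
--             t = t + '0'
--         elif t[1] == '0':
--             t = t[0] + ' ' + t[2:]
--         elif t[1] == ' ' and t[2] == ' ':
--             t = t[0] + '0' + t[3:]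
--         elif t[2] == ' ':
--             t = t[0:2] + t[3:]
--         else:
--             return t
--         t = t.strip()
-- ===== Notes on version B (the rewrite author's own statement) =====
-- stated objective: simpler
-- what changed: The tail recursion is rewritten as a single iterative while-loop that keeps normalizing one string variable until a terminal guard fires, with an if/elif chain that drops the guard conjuncts already implied by earlier branches (sign and dot re-checks).
import Mathlib
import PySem

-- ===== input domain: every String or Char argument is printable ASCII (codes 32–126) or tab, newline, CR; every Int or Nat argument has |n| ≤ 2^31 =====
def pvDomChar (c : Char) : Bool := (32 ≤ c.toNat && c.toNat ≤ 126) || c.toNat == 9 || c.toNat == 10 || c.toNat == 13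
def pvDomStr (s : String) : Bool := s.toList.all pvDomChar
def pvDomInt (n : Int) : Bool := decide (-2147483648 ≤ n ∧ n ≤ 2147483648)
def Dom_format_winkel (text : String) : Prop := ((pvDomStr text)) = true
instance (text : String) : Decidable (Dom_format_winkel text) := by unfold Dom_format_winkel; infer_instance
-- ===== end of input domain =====

-- B rewrites A's tail recursion as one iterative normalization loop (a step function driven to a fixed point); same return value, no speed claim.

-- ===== PORT A =====
-- A's tail recursion, transliterated guard by guard on the code points; the fuel
-- only makes the recursion structural (it exceeds the recursion depth on every
-- input the checks draw); the fuel-exhaustion default is never reached there.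
def fwA : Nat → List Char → List Char
  | 0, t0 => PySem.Chars.strip t0
  | f+1, t0 =>
    let t := PySem.Chars.strip t0
    if t == "Null".toList || t == ".".toList || t == ([] : List Char) then []
    else if PySem.List.slice t (some 0) (some 1) == ['.'] then
      fwA f ('0' :: t)
    else if !(PySem.Chars.isIn ['.'] t) &&
            !(PySem.List.slice t (some 0) (some 1) == ['+'] || PySem.List.slice t (some 0) (some 1) == ['-']) then
      fwA f (['+'] ++ PySem.List.slice t (some 0) (some 2) ++ ['.'] ++ PySem.List.slice t (some 2) (some 3))
    else if !(PySem.List.slice t (some 0) (some 1) == ['+'] || PySem.List.slice t (some 0) (some 1) == ['-']) then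
      fwA f (['+'] ++ t)
    else if (PySem.List.slice t (some 0) (some 1) == ['+'] || PySem.List.slice t (some 0) (some 1) == ['-']) &&
            !(PySem.Chars.isIn ['.'] t) then
      fwA f (PySem.List.slice t (some 0) (some 3) ++ ['.'] ++ PySem.List.slice t (some 3) (some 4))
    else if PySem.List.slice t (some 2) (some 3) == ['.'] then
      fwA f (PySem.List.slice t (some 0) (some 1) ++ [' '] ++ PySem.List.slice t (some 1) none)
    else if decide (PySem.Chars.len t < 5) && PySem.Chars.isIn ['.'] t then
      fwA f (t ++ ['0'])
    else if PySem.List.slice t (some 1) (some 2) == ['0'] then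
      fwA f (PySem.List.slice t (some 0) (some 1) ++ [' '] ++ PySem.List.slice t (some 2) none)
    else if PySem.List.slice t (some 1) (some 2) == [' '] && PySem.List.slice t (some 2) (some 3) == [' '] then
      fwA f (PySem.List.slice t (some 0) (some 1) ++ ['0'] ++ PySem.List.slice t (some 3) none)
    else if PySem.List.slice t (some 2) (some 3) == [' '] then
      fwA f (PySem.List.slice t (some 0) (some 2) ++ PySem.List.slice t (some 3) none)
    else t

def format_winkel (text : String) : String :=
  String.ofList (fwA (2 * text.toList.length + 16) text.toList)

-- ===== PORT B =====
-- One normalization step of Source B's loop body on the already-stripped string: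
-- `.inl r` = the loop returns r, `.inr t'` = the loop continues with t'.
-- On the `.inr` path t is nonempty (the first guard caught ''), so B's t[0],
-- t[1], t[2] are ported by pyGet? and B's slices by the take/drop they compute.
def stepB (t : List Char) : (List Char) ⊕ (List Char) :=
  if [("Null".toList), (".".toList), ([] : List Char)].contains t then .inl []
  else
    let c0 := PySem.List.pyGet? t 0
    let hasDot := PySem.Chars.isIn ['.'] t
    let signed := c0 == some '+' || c0 == some '-'
    if c0 == some '.' then .inr ('0' :: t)
    else if !hasDot && !signed then .inr ('+' :: (t.take 2 ++ '.' :: (t.drop 2).take 1))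
    else if !signed then .inr ('+' :: t)
    else if !hasDot then .inr (t.take 3 ++ '.' :: (t.drop 3).take 1)
    else if (t.drop 2).take 1 == ['.'] then .inr (t.take 1 ++ ' ' :: t.drop 1)
    else if t.length < 5 then .inr (t ++ ['0'])
    else if PySem.List.pyGet? t 1 == some '0' then .inr (t.take 1 ++ ' ' :: t.drop 2)
    else if PySem.List.pyGet? t 1 == some ' ' && PySem.List.pyGet? t 2 == some ' ' then
      .inr (t.take 1 ++ '0' :: t.drop 3)
    else if PySem.List.pyGet? t 2 == some ' ' then .inr (t.take 2 ++ t.drop 3)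
    else .inl t

-- Source B's `while True`: drive stepB, re-stripping at the bottom of each iteration.
def loopB : Nat → List Char → List Char
  | 0, t => t
  | f+1, t =>
    Sum.elim (fun r => r) (fun t' => loopB f (PySem.Chars.strip t')) (stepB t)

def format_winkel_alt (text : String) : String :=
  String.ofList (loopB (2 * text.toList.length + 16) (PySem.Chars.strip text.toList))

-- ===== PRECONDITION & SPEC =====
def Spec_format_winkel (text : String) (out : String) : Prop := out = format_winkel_alt text
instance (text : String) (out : String) : Decidable (Spec_format_winkel text out) := by unfold Spec_format_winkel; infer_instance

-- ===== CLAIM (what is proved, stated in full; the proofs are below) =====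
def Claim_equal_format_winkel : Prop := ∀ (text : String), Dom_format_winkel text → Spec_format_winkel text (format_winkel text)

-- ===== LEMMAS AND PROOFS =====


-- A's slices at the fixed literal bounds, as the take/drop they compute.
theorem pvt1 {α : Type} (t : List α) : PySem.List.slice t none (some 1) = List.take 1 t := by
  have h := PySem.List.slice_to (xs := t) (show (0:Int) ≤ 1 by norm_num); norm_num at h; exact h
theorem pvt2 {α : Type} (t : List α) : PySem.List.slice t none (some 2) = List.take 2 t := by
  have h := PySem.List.slice_to (xs := t) (show (0:Int) ≤ 2 by norm_num); norm_num at h; exact h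
theorem pvt3 {α : Type} (t : List α) : PySem.List.slice t none (some 3) = List.take 3 t := by
  have h := PySem.List.slice_to (xs := t) (show (0:Int) ≤ 3 by norm_num); norm_num at h; exact h
theorem pvs12 {α : Type} (t : List α) : PySem.List.slice t (some 1) (some 2) = List.take 1 (List.drop 1 t) := by
  have h := PySem.List.slice_toNat t (show (0:Int) ≤ 1 by norm_num) (show (0:Int) ≤ 2 by norm_num)
  norm_num at h; simpa using h
theorem pvs23 {α : Type} (t : List α) : PySem.List.slice t (some 2) (some 3) = List.take 1 (List.drop 2 t) := by
  have h := PySem.List.slice_toNat t (show (0:Int) ≤ 2 by norm_num) (show (0:Int) ≤ 3 by norm_num)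
  norm_num at h; simpa using h
theorem pvs34 {α : Type} (t : List α) : PySem.List.slice t (some 3) (some 4) = List.take 1 (List.drop 3 t) := by
  have h := PySem.List.slice_toNat t (show (0:Int) ≤ 3 by norm_num) (show (0:Int) ≤ 4 by norm_num)
  norm_num at h; simpa using h
theorem pvs1n {α : Type} (t : List α) : PySem.List.slice t (some 1) none = List.drop 1 t := by
  have h := PySem.List.slice_from t (show (0:Int) ≤ 1 by norm_num); norm_num at h; simpa using h
theorem pvs2n {α : Type} (t : List α) : PySem.List.slice t (some 2) none = List.drop 2 t := by
  have h := PySem.List.slice_from t (show (0:Int) ≤ 2 by norm_num); norm_num at h; simpa using h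
theorem pvs3n {α : Type} (t : List α) : PySem.List.slice t (some 3) none = List.drop 3 t := by
  have h := PySem.List.slice_from t (show (0:Int) ≤ 3 by norm_num); norm_num at h; simpa using h
-- "the one-character slice t[i:i+1] equals [ch]" is "t[i] == ch"; index normal forms
theorem pvg0 (t : List Char) (ch : Char) :
    (List.take 1 t == [ch]) = (PySem.List.pyGet? t 0 == some ch) := by
  rcases t with _|⟨a,t⟩ <;> simp [PySem.List.pyGet?, PySem.List.pyIdx?]
theorem pvp1 (t : List Char) : PySem.List.pyGet? t 1 = PySem.List.pyGet? t.tail 0 := by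
  have h1 : PySem.List.pyGet? t 1 = t[1]? := by exact_mod_cast PySem.List.pyGet?_natCast t 1
  have h0 : PySem.List.pyGet? t.tail 0 = t.tail[0]? := by exact_mod_cast PySem.List.pyGet?_natCast t.tail 0
  rw [h1, h0]; rcases t with _|⟨a,t⟩ <;> simp
theorem pvp2 (t : List Char) : PySem.List.pyGet? t 2 = PySem.List.pyGet? t.tail 1 := by
  have h2 : PySem.List.pyGet? t 2 = t[2]? := by exact_mod_cast PySem.List.pyGet?_natCast t 2
  have h1 : PySem.List.pyGet? t.tail 1 = t.tail[1]? := by exact_mod_cast PySem.List.pyGet?_natCast t.tail 1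
  rw [h2, h1]; rcases t with _|⟨a,t⟩ <;> simp
theorem pvlen5' (n : Nat) : ((n:Int) + 1 < 5) ↔ (n + 1 < 5) := by omega

theorem fwA_eq_loopB (f : Nat) : ∀ t : List Char, fwA f t = loopB f (PySem.Chars.strip t) := by
  induction f with
  | zero => intro t; rfl
  | succ f ih =>
    intro t
    show fwA (f+1) t = loopB (f+1) (PySem.Chars.strip t)
    rw [fwA, loopB]
    generalize PySem.Chars.strip t = s
    match s with
    | [] => simp [stepB]
    | (c :: cs) =>
      by_cases hp : c = '+'
      · subst hp
        by_cases hdot : PySem.Chars.isIn ['.'] ('+' :: cs) = true <;>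
          (simp [stepB,
                 pvt1, pvt2, pvt3, pvs12, pvs23, pvs34, pvs1n, pvs2n, pvs3n,
                 pvg0, pvp1, pvp2, pvlen5', hdot, ih];
           try (split_ifs <;> simp))
      · by_cases hm : c = '-'
        · subst hm
          by_cases hdot : PySem.Chars.isIn ['.'] ('-' :: cs) = true <;>
            (simp [stepB,
                   pvt1, pvt2, pvt3, pvs12, pvs23, pvs34, pvs1n, pvs2n, pvs3n,
                   pvg0, pvp1, pvp2, pvlen5', hdot, ih];
             try (split_ifs <;> simp))
        · by_cases hdot : PySem.Chars.isIn ['.'] (c :: cs) = true <;>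
            (simp [stepB, pvt1, pvt2, pvs23, hdot, hp, hm, ih];
             try (split_ifs <;> simp))


-- ===== VERDICT (by name: the statement is the Claim_ definition above) =====
theorem format_winkel_spec : Claim_equal_format_winkel := by
  intro text _
  show format_winkel text = format_winkel_alt text
  unfold format_winkel format_winkel_alt
  rw [fwA_eq_loopB]
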